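-- pv_equiv track=rewrite | github.com/gloriapascuti/Gloria_FP_review | assignment4/main.py | prime_decompositions_iterative
-- ===== SOURCE A (Python) =====
-- from typing import List
--
-- def is_prime(value: int) -> bool:
--     """
--     This function checks if a certain number is prime
--     :param value: the number to be checked
--     :return: the truth depending on the value
--     """
--     if value <= 1:
--         return False
--     for i in range(2, value // 2 + 1):
--         if value % i == 0:
--             return False
--     return True
--
-- def next_prime(value):
--     while True:
--         if is_prime(value):
--             return value
--         value += 1
--
-- def prime_decompositions_iterative(value: int) -> List[List[int]]:
--     stack = [(0, value, [])]
--     result = []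
--
--     while stack:
--         current, target, partial = stack.pop()
--
--         if target == 0:
--             result.append(partial[:])
--             continue
--
--         while current <= value:
--             current = next_prime(current)
--             if target - current >= 0:
--                 stack.append((current, target - current, partial + [current]))
--             current += 1
--
--     return result
-- ===== SOURCE B (Python) =====
-- def prime_decompositions_iterative(value):
--     # Precompute the primes up to value once, then enumerate decompositions
--     # by recursion over this list instead of re-searching for the next prime
--     # with trial division at every node.
--     primes = [p for p in range(2, value + 1) if is_prime(p)]
--
--     def go(low, target, partial):
--         if target == 0:
--             return [partial]
--         out = []
--         for p in reversed(primes):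
--             if low <= p <= target:
--                 out.extend(go(p, target - p, partial + [p]))
--         return out
--
--     return go(0, value, [])
--
-- def is_prime(value):
--     if value <= 1:
--         return False
--     for i in range(2, value // 2 + 1):
--         if value % i == 0:
--             return False
--     return True
-- ===== Notes on version B (the rewrite author's own statement) =====
-- stated objective: faster
-- what changed: A runs a stack machine that re-discovers each next prime with next_prime (trial division up to value//2) at every node; B computes the prime list up to value once and enumerates the decompositions by a recursion over that list, so no primality test is ever repeated per node (intended as faster; measured ~20x at sizes where both finish - the output, hence both programs, is exponential in value).
import Mathlib
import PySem

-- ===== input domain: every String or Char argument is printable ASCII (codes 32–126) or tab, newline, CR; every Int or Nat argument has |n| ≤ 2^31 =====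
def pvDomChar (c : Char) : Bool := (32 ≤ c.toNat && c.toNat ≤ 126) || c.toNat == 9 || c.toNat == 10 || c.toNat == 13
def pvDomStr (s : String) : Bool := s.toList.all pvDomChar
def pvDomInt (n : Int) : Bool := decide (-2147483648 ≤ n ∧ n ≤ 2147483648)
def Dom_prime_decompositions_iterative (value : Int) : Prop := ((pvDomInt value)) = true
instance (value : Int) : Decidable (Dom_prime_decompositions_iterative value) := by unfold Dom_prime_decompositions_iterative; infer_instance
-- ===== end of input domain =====

-- B replaces A's stack machine, which re-searches for the next prime by trial
-- division at every node, by one precomputed prime list and a recursion over it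
-- (objective: faster — intended as faster; a timing run measured ~20x at
-- sizes where both finish; the output itself grows exponentially in value, so
-- both programs are exponential overall).
-- Both ports are fueled (the fuel arguments are totality guards only; the
-- proofs show the chosen fuels always suffice).

-- ===== PORT A =====
-- shared helper: the module's is_prime (Source B contains the identical function)
def pv_isPrimeLoop (v : Int) : List Int → Bool
  | [] => true
  | i :: rest => if PySem.Int.mod v i == 0 then false else pv_isPrimeLoop v rest

def pv_is_prime (v : Int) : Bool :=
  if v ≤ 1 then false
  else pv_isPrimeLoop v (PySem.List.pyRange 2 (PySem.Int.floordiv v 2 + 1) 1)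

-- next_prime's `while True`: fueled linear search; the fuel below always
-- suffices (pv_exists_prime_witness), so the 0-case is never reached
def pvA_next_prime_go : Nat → Int → Int
  | 0, c => c
  | f + 1, c => if pv_is_prime c then c else pvA_next_prime_go f (c + 1)

def pvA_next_prime (c : Int) : Int :=
  pvA_next_prime_go ((2 - c).toNat + 2 * c.toNat + 6) c

-- the inner `while current <= value` loop; current strictly increases, so the
-- fuel chosen at the call site suffices
def pvA_inner (value target : Int) (part : List Int) :
    Nat → Int → List (Int × Int × List Int) → List (Int × Int × List Int)
  | 0, _, stack => stack
  | f + 1, current, stack =>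
    if current ≤ value then
      let c2 := pvA_next_prime current
      pvA_inner value target part f (c2 + 1)
        (if target - c2 ≥ 0 then (c2, target - c2, part ++ [c2]) :: stack else stack)
    else stack

-- the outer `while stack` loop (head of the list = top of the stack)
def pvA_loop (value : Int) : Nat → List (Int × Int × List Int) → List (List Int) → List (List Int)
  | 0, _, result => result
  | _ + 1, [], result => result
  | f + 1, (current, target, part) :: rest, result =>
    if target = 0 then pvA_loop value f rest (result ++ [part])
    else pvA_loop value f
      (pvA_inner value target part ((value + 1 - current).toNat + 1) current rest) result

def prime_decompositions_iterative (value : Int) : List (List Int) :=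
  pvA_loop value (3 ^ value.toNat + 1) [(0, value, [])] []

-- ===== PORT B =====
def pvB_primes (value : Int) : List Int :=
  (PySem.List.pyRange 2 (value + 1) 1).filter (fun p => pv_is_prime p)

mutual
-- `go`; the fuel (a totality guard) always suffices: each recursive call
-- strictly decreases the target, which bounds the depth
def pvB_go (primes : List Int) (fuel : Nat) (low target : Int) (part : List Int) :
    List (List Int) :=
  match fuel with
  | 0 => []
  | f + 1 =>
    if target = 0 then [part]
    else pvB_scan primes f primes.reverse low target part
termination_by (2 * fuel, 0)

-- the `for p in reversed(primes)` loop of go, extending `out`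
def pvB_scan (primes : List Int) (f : Nat) (rem : List Int) (low target : Int)
    (part : List Int) : List (List Int) :=
  match rem with
  | [] => []
  | p :: rest =>
    (if low ≤ p ∧ p ≤ target then pvB_go primes f p (target - p) (part ++ [p]) else [])
      ++ pvB_scan primes f rest low target part
termination_by (2 * f + 1, rem.length)
decreasing_by
  · exact Prod.Lex.left _ _ (by omega)
  · exact Prod.Lex.right _ (by simp)
end

def prime_decompositions_iterative_alt (value : Int) : List (List Int) :=
  pvB_go (pvB_primes value) (value.toNat + 1) 0 value []

-- ===== PRECONDITION & SPEC =====
def Spec_prime_decompositions_iterative (value : Int) (out : List (List Int)) : Prop := out = prime_decompositions_iterative_alt value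
instance (value : Int) (out : List (List Int)) : Decidable (Spec_prime_decompositions_iterative value out) := by unfold Spec_prime_decompositions_iterative; infer_instance

-- ===== CLAIM (what is proved, stated in full; the proofs are below) =====
def Claim_equal_prime_decompositions_iterative : Prop := ∀ (value : Int), Dom_prime_decompositions_iterative value → Spec_prime_decompositions_iterative value (prime_decompositions_iterative value)

-- ===== LEMMAS AND PROOFS =====

theorem pv_isPrimeLoop_eq_true (v : Int) (l : List Int) :
    pv_isPrimeLoop v l = true ↔ ∀ i ∈ l, ¬ PySem.Int.mod v i = 0 := by
  induction l with
  | nil => simp [pv_isPrimeLoop]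
  | cons i rest ih =>
    simp only [pv_isPrimeLoop]
    by_cases h : PySem.Int.mod v i = 0 <;> simp [h, ih]

theorem pv_is_prime_of_natPrime (P : Nat) (hP : P.Prime) : pv_is_prime (P : Int) = true := by
  have h2 : 2 ≤ P := hP.two_le
  unfold pv_is_prime
  have hn1 : ¬ ((P : Int) ≤ 1) := by omega
  simp only [hn1, if_false]
  rw [pv_isPrimeLoop_eq_true]
  intro i hi hmod
  rw [PySem.List.mem_pyRange_one] at hi
  obtain ⟨hi2, hilt⟩ := hi
  rw [PySem.Int.floordiv_eq_ediv_of_pos (by norm_num)] at hilt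
  have hdvd : i ∣ (P : Int) := (PySem.Int.mod_eq_zero_iff_dvd _ _).mp hmod
  have hile : i ≤ (P : Int) / 2 := by omega
  have hiP : i < (P : Int) := by omega
  have : i.toNat ∣ P := by
    have hi0 : (i.toNat : Int) = i := by omega
    exact_mod_cast hi0 ▸ hdvd
  have := (Nat.Prime.eq_one_or_self_of_dvd hP _ this)
  omega

theorem pv_is_prime_two_le (p : Int) (h : pv_is_prime p = true) : 2 ≤ p := by
  unfold pv_is_prime at h
  by_cases hp : p ≤ 1
  · simp [hp] at h
  · omega

-- some prime ≥ c is reached within the fuel pvA_next_prime passes to its search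
theorem pv_exists_prime_witness (c : Int) :
    ∃ p, c ≤ p ∧ pv_is_prime p = true ∧ (p - c).toNat < (2 - c).toNat + 2 * c.toNat + 6 := by
  by_cases hc : c ≤ 2
  · exact ⟨2, by omega, by decide, by omega⟩
  · obtain ⟨p, hp, hlt, hle⟩ := Nat.exists_prime_lt_and_le_two_mul c.toNat (by omega)
    exact ⟨(p : Int), by omega, pv_is_prime_of_natPrime p hp, by omega⟩

theorem pvA_next_prime_go_spec (f : Nat) :
    ∀ (c p : Int), c ≤ p → pv_is_prime p = true → (p - c).toNat < f →
      pv_is_prime (pvA_next_prime_go f c) = true ∧ c ≤ pvA_next_prime_go f c ∧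
        ∀ q, c ≤ q → q < pvA_next_prime_go f c → pv_is_prime q = false := by
  induction f with
  | zero => intro c p _ _ h; omega
  | succ f ih =>
    intro c p hcp hp hf
    rw [pvA_next_prime_go]
    by_cases hc : pv_is_prime c = true
    · rw [if_pos hc]
      exact ⟨hc, le_refl c, fun q h1 h2 => by omega⟩
    · rw [if_neg hc]
      have hne : c ≠ p := fun h => hc (h ▸ hp)
      obtain ⟨h1, h2, h3⟩ := ih (c + 1) p (by omega) hp (by omega)
      refine ⟨h1, by omega, ?_⟩
      intro q hq1 hq2
      by_cases hqc : q = c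
      · subst hqc; simpa using hc
      · exact h3 q (by omega) hq2

theorem pvA_next_prime_isPrime (c : Int) : pv_is_prime (pvA_next_prime c) = true := by
  obtain ⟨p, h1, h2, h3⟩ := pv_exists_prime_witness c
  exact (pvA_next_prime_go_spec _ c p h1 h2 h3).1

theorem pvA_le_next_prime (c : Int) : c ≤ pvA_next_prime c := by
  obtain ⟨p, h1, h2, h3⟩ := pv_exists_prime_witness c
  exact (pvA_next_prime_go_spec _ c p h1 h2 h3).2.1

theorem pvA_next_prime_min (c : Int) :
    ∀ q, c ≤ q → q < pvA_next_prime c → pv_is_prime q = false := by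
  obtain ⟨p, h1, h2, h3⟩ := pv_exists_prime_witness c
  exact (pvA_next_prime_go_spec _ c p h1 h2 h3).2.2

-- measure for the outer loop: each stack node weighs 3^target
def pvMeasItem (node : Int × Int × List Int) : Nat := 3 ^ node.2.1.toNat
def pvMeas (s : List (Int × Int × List Int)) : Nat := (s.map pvMeasItem).sum

theorem pv_sum_Icc2_lt (t : Int) :
    (∑ j ∈ Finset.Icc (2 : Int) t, 3 ^ ((t - j).toNat)) < 3 ^ t.toNat := by
  by_cases ht : t ≤ 1
  · rw [Finset.Icc_eq_empty (by omega)]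
    simp
  · have ht1 : (1 : Int) ≤ t := by omega
    clear ht
    induction t, ht1 using Int.le_induction with
    | base => rw [Finset.Icc_eq_empty (by omega)]; simp
    | succ t ht ih =>
      have hIcc : Finset.Icc (2 : Int) (t + 1) = insert (t + 1) (Finset.Icc (2 : Int) t) := by
        ext x; simp only [Finset.mem_Icc, Finset.mem_insert]; omega
      rw [hIcc, Finset.sum_insert (by simp)]
      have hshift : ∀ j ∈ Finset.Icc (2 : Int) t, 3 ^ ((t + 1 - j).toNat) = 3 * 3 ^ ((t - j).toNat) := by
        intro j hj
        rw [Finset.mem_Icc] at hj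
        have : (t + 1 - j).toNat = (t - j).toNat + 1 := by omega
        rw [this, pow_succ]; ring
      rw [Finset.sum_congr rfl hshift, ← Finset.mul_sum]
      have h1 : (t + 1).toNat = t.toNat + 1 := by omega
      rw [h1, pow_succ]
      have : (t + 1 - (t + 1)).toNat = 0 := by omega
      rw [this]
      omega

theorem pvA_inner_meas_aux (value t : Int) (part : List Int) (f : Nat) :
    ∀ (current : Int) (stack : List (Int × Int × List Int)),
      pvMeas (pvA_inner value t part f current stack) ≤
        pvMeas stack + ∑ j ∈ Finset.Icc (max current 2) t, 3 ^ ((t - j).toNat) := by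
  induction f with
  | zero => intro current stack; simp [pvA_inner]
  | succ f ih =>
    intro current stack
    simp only [pvA_inner]
    by_cases hle : current ≤ value
    · rw [if_pos hle]
      set c2 := pvA_next_prime current with hc2
      have hc2c : current ≤ c2 := pvA_le_next_prime current
      have hc22 : 2 ≤ c2 := pv_is_prime_two_le _ (pvA_next_prime_isPrime current)
      by_cases hpush : t - c2 ≥ 0
      · rw [if_pos hpush]
        have ihx := ih (c2 + 1) ((c2, t - c2, part ++ [c2]) :: stack)
        have hstep : pvMeas ((c2, t - c2, part ++ [c2]) :: stack)
            = pvMeas stack + 3 ^ ((t - c2).toNat) := by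
          simp [pvMeas, pvMeasItem]; ring
        have hmax : max (c2 + 1) 2 = c2 + 1 := by omega
        rw [hmax, hstep] at ihx
        have hins : Finset.Icc c2 t = insert c2 (Finset.Icc (c2 + 1) t) := by
          ext x; simp only [Finset.mem_Icc, Finset.mem_insert]; omega
        have hsub2 : (Finset.Icc c2 t) ⊆ Finset.Icc (max current 2) t := by
          intro x hx; simp only [Finset.mem_Icc] at *; omega
        have hle2 : 3 ^ ((t - c2).toNat) + ∑ j ∈ Finset.Icc (c2 + 1) t, 3 ^ ((t - j).toNat)
            ≤ ∑ j ∈ Finset.Icc (max current 2) t, 3 ^ ((t - j).toNat) := by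
          calc 3 ^ ((t - c2).toNat) + ∑ j ∈ Finset.Icc (c2 + 1) t, 3 ^ ((t - j).toNat)
              = ∑ j ∈ Finset.Icc c2 t, 3 ^ ((t - j).toNat) := by
                rw [hins, Finset.sum_insert (by simp)]
            _ ≤ _ := Finset.sum_le_sum_of_subset hsub2
        omega
      · rw [if_neg hpush]
        have ihx := ih (c2 + 1) stack
        have hmax : max (c2 + 1) 2 = c2 + 1 := by omega
        rw [hmax] at ihx
        have hsub : (Finset.Icc (c2 + 1) t) ⊆ Finset.Icc (max current 2) t := by
          intro x hx; simp only [Finset.mem_Icc] at *; omega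
        have hmono : ∑ j ∈ Finset.Icc (c2 + 1) t, 3 ^ ((t - j).toNat)
            ≤ ∑ j ∈ Finset.Icc (max current 2) t, 3 ^ ((t - j).toNat) :=
          Finset.sum_le_sum_of_subset hsub
        omega
    · rw [if_neg hle]
      simp

theorem pvA_inner_meas (value target : Int) (part : List Int) (f : Nat) (current : Int)
    (stack : List (Int × Int × List Int)) :
    pvMeas (pvA_inner value target part f current stack) < pvMeas stack + 3 ^ target.toNat := by
  have h1 := pvA_inner_meas_aux value target part f current stack
  have hsub : (Finset.Icc (max current 2) target) ⊆ Finset.Icc (2 : Int) target := by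
    intro x hx; simp only [Finset.mem_Icc] at *; omega
  have h2 : ∑ j ∈ Finset.Icc (max current 2) target, 3 ^ ((target - j).toNat)
      ≤ ∑ j ∈ Finset.Icc (2 : Int) target, 3 ^ ((target - j).toNat) :=
    Finset.sum_le_sum_of_subset hsub
  have h3 := pv_sum_Icc2_lt target
  omega

theorem mem_pvB_primes (value : Int) (p : Int) :
    p ∈ pvB_primes value ↔ (pv_is_prime p = true ∧ p ≤ value) := by
  unfold pvB_primes
  rw [List.mem_filter, PySem.List.mem_pyRange_one]
  constructor
  · rintro ⟨⟨h2, hlt⟩, hp⟩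
    exact ⟨hp, by omega⟩
  · rintro ⟨hp, hle⟩
    have := pv_is_prime_two_le p hp
    exact ⟨⟨by omega, by omega⟩, hp⟩

theorem pairwise_pvB_primes (value : Int) : (pvB_primes value).Pairwise (· < ·) := by
  unfold pvB_primes
  exact (PySem.List.pairwise_lt_pyRange_one 2 (value + 1)).filter _

theorem pvB_scan_eq (primes : List Int) (f : Nat) (rem : List Int)
    (low target : Int) (part : List Int) :
    pvB_scan primes f rem low target part =
      (rem.filter (fun p => decide (low ≤ p ∧ p ≤ target))).flatMap
        (fun p => pvB_go primes f p (target - p) (part ++ [p])) := by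
  induction rem with
  | nil => simp [pvB_scan]
  | cons p rest ih =>
    rw [pvB_scan, ih]
    by_cases h : low ≤ p ∧ p ≤ target
    · simp [h]
    · simp [h]

theorem pvB_go_zero (primes : List Int) (f : Nat) (low : Int) (part : List Int) :
    pvB_go primes (f + 1) low 0 part = [part] := by
  rw [pvB_go]
  simp

theorem pvB_go_ne (primes : List Int) (f : Nat) (low target : Int) (part : List Int)
    (h : ¬ target = 0) :
    pvB_go primes (f + 1) low target part =
      ((primes.filter (fun p => decide (low ≤ p ∧ p ≤ target))).reverse).flatMap
        (fun p => pvB_go primes f p (target - p) (part ++ [p])) := by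
  rw [pvB_go, if_neg h, pvB_scan_eq, List.filter_reverse]

-- sufficient fuel: pvB_go's result does not depend on the fuel once it exceeds the target
theorem pvB_go_fuel (n : Nat) :
    ∀ (primes : List Int) (low target : Int) (part : List Int) (f1 f2 : Nat),
      (∀ p ∈ primes, 2 ≤ p) → target.toNat ≤ n → target.toNat < f1 → target.toNat < f2 →
      pvB_go primes f1 low target part = pvB_go primes f2 low target part := by
  induction n with
  | zero =>
    intro primes low target part f1 f2 hpr ht h1 h2
    obtain ⟨g1, rfl⟩ : ∃ g, f1 = g + 1 := ⟨f1 - 1, by omega⟩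
    obtain ⟨g2, rfl⟩ : ∃ g, f2 = g + 1 := ⟨f2 - 1, by omega⟩
    by_cases h0 : target = 0
    · subst h0; rw [pvB_go_zero, pvB_go_zero]
    · rw [pvB_go_ne _ _ _ _ _ h0, pvB_go_ne _ _ _ _ _ h0]
      have : primes.filter (fun p => decide (low ≤ p ∧ p ≤ target)) = [] := by
        rw [List.filter_eq_nil_iff]
        intro p hp
        have := hpr p hp
        simp only [decide_eq_true_eq, not_and]
        intro _
        omega
      rw [this]
      simp
  | succ n ih =>
    intro primes low target part f1 f2 hpr ht h1 h2
    obtain ⟨g1, rfl⟩ : ∃ g, f1 = g + 1 := ⟨f1 - 1, by omega⟩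
    obtain ⟨g2, rfl⟩ : ∃ g, f2 = g + 1 := ⟨f2 - 1, by omega⟩
    by_cases h0 : target = 0
    · subst h0; rw [pvB_go_zero, pvB_go_zero]
    · rw [pvB_go_ne _ _ _ _ _ h0, pvB_go_ne _ _ _ _ _ h0]
      apply List.flatMap_congr
      intro p hp
      rw [List.mem_reverse, List.mem_filter] at hp
      obtain ⟨hmem, hcond⟩ := hp
      simp only [decide_eq_true_eq] at hcond
      have hp2 := hpr p hmem
      exact ih primes p (target - p) (part ++ [p]) g1 g2 hpr (by omega) (by omega) (by omega)

theorem pv_filter_split (value c2 current t : Int)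
    (hprime : pv_is_prime c2 = true) (hc2v : c2 ≤ value) (hcur : current ≤ c2) (hc2t : c2 ≤ t)
    (hmin : ∀ q, current ≤ q → q < c2 → pv_is_prime q = false) :
    (pvB_primes value).filter (fun p => decide (current ≤ p ∧ p ≤ t)) =
      c2 :: (pvB_primes value).filter (fun p => decide (c2 + 1 ≤ p ∧ p ≤ t)) := by
  have hmem : c2 ∈ pvB_primes value := (mem_pvB_primes value c2).mpr ⟨hprime, hc2v⟩
  obtain ⟨s, u, hL⟩ := List.append_of_mem hmem
  have hpw := pairwise_pvB_primes value
  rw [hL] at hpw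
  rw [List.pairwise_append] at hpw
  obtain ⟨hpw_s, hpw_cu, hcross⟩ := hpw
  have hs_lt : ∀ a ∈ s, a < c2 := fun a ha => hcross a ha _ (List.mem_cons_self ..)
  have hu_gt : ∀ a ∈ u, c2 < a := by
    intro a ha
    exact (List.pairwise_cons.mp hpw_cu).1 a ha
  have hmemL : ∀ a ∈ s, a ∈ pvB_primes value := by
    intro a ha; rw [hL]; exact List.mem_append_left _ ha
  rw [hL, List.filter_append, List.filter_append]
  have hfs1 : s.filter (fun p => decide (current ≤ p ∧ p ≤ t)) = [] := by
    rw [List.filter_eq_nil_iff]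
    intro a ha
    simp only [decide_eq_true_eq, not_and]
    intro hca _
    have hlt := hs_lt a ha
    have hmem' := (mem_pvB_primes value a).mp (hmemL a ha)
    have := hmin a hca hlt
    rw [hmem'.1] at this
    cases this
  have hfs2 : s.filter (fun p => decide (c2 + 1 ≤ p ∧ p ≤ t)) = [] := by
    rw [List.filter_eq_nil_iff]
    intro a ha
    have hlt := hs_lt a ha
    simp only [decide_eq_true_eq, not_and]
    intro h1
    omega
  rw [hfs1, hfs2]
  simp only [List.nil_append, List.filter_cons, decide_eq_true_eq]
  rw [if_pos ⟨hcur, hc2t⟩, if_neg (by omega)]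
  have hu_eq : u.filter (fun p => decide (current ≤ p ∧ p ≤ t))
      = u.filter (fun p => decide (c2 + 1 ≤ p ∧ p ≤ t)) := by
    apply List.filter_congr
    intro a ha
    have := hu_gt a ha
    simp only [decide_eq_decide]
    constructor
    · rintro ⟨h1, hh2⟩; exact ⟨by omega, hh2⟩
    · rintro ⟨h1, hh2⟩; exact ⟨by omega, hh2⟩
  rw [hu_eq]

theorem pvA_inner_spec (value t : Int) (part : List Int) (ht : t ≤ value) (f : Nat) :
    ∀ (current : Int) (stack : List (Int × Int × List Int)),
      (value + 1 - current).toNat < f →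
      pvA_inner value t part f current stack =
        (((pvB_primes value).filter (fun p => decide (current ≤ p ∧ p ≤ t))).reverse.map
          (fun p => (p, t - p, part ++ [p]))) ++ stack := by
  induction f with
  | zero => intro current stack h; omega
  | succ f ih =>
    intro current stack hf
    simp only [pvA_inner]
    by_cases hle : current ≤ value
    · rw [if_pos hle]
      set c2 := pvA_next_prime current with hc2def
      have hc2c : current ≤ c2 := pvA_le_next_prime current
      have hc2p : pv_is_prime c2 = true := pvA_next_prime_isPrime current
      have hc22 : 2 ≤ c2 := pv_is_prime_two_le _ hc2p
      have hmin : ∀ q, current ≤ q → q < c2 → pv_is_prime q = false := pvA_next_prime_min current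
      have hfrec : (value + 1 - (c2 + 1)).toNat < f := by omega
      by_cases hpush : t - c2 ≥ 0
      · rw [if_pos hpush]
        rw [ih (c2 + 1) _ hfrec]
        rw [pv_filter_split value c2 current t hc2p (by omega) hc2c (by omega) hmin]
        simp
      · rw [if_neg hpush]
        rw [ih (c2 + 1) stack hfrec]
        have h1 : (pvB_primes value).filter (fun p => decide (current ≤ p ∧ p ≤ t)) = [] := by
          rw [List.filter_eq_nil_iff]
          intro a ha
          simp only [decide_eq_true_eq, not_and]
          intro hca hat
          have hmem' := (mem_pvB_primes value a).mp ha
          have := hmin a hca (by omega)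
          rw [hmem'.1] at this
          cases this
        have h2 : (pvB_primes value).filter (fun p => decide (c2 + 1 ≤ p ∧ p ≤ t)) = [] := by
          rw [List.filter_eq_nil_iff]
          intro a ha
          simp only [decide_eq_true_eq, not_and]
          intro h1'
          omega
        rw [h1, h2]
    · rw [if_neg hle]
      have h1 : (pvB_primes value).filter (fun p => decide (current ≤ p ∧ p ≤ t)) = [] := by
        rw [List.filter_eq_nil_iff]
        intro a ha
        have hmem' := (mem_pvB_primes value a).mp ha
        simp only [decide_eq_true_eq, not_and]
        intro hca hat
        omega
      rw [h1]
      simp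

theorem pv_loop_eq (value : Int) :
    ∀ (f : Nat) (stack : List (Int × Int × List Int)) (result : List (List Int)),
      pvMeas stack < f → (∀ node ∈ stack, node.2.1 ≤ value) →
      pvA_loop value f stack result =
        result ++ stack.flatMap
          (fun node => pvB_go (pvB_primes value) (node.2.1.toNat + 1) node.1 node.2.1 node.2.2) := by
  intro f
  induction f with
  | zero => intro stack result hm _; omega
  | succ f ih =>
    intro stack result hm hinv
    cases stack with
    | nil => simp [pvA_loop]
    | cons node rest =>
      obtain ⟨current, target, part⟩ := node
      by_cases ht : target = 0
      · subst ht
        rw [pvA_loop, if_pos rfl]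
        rw [ih rest (result ++ [part]) ?_ (fun nd hnd => hinv nd (List.mem_cons_of_mem _ hnd))]
        · simp [pvB_go_zero]
        · have hpos : 0 < pvMeasItem (current, 0, part) := by unfold pvMeasItem; positivity
          simp only [pvMeas, List.map_cons, List.sum_cons] at hm
          simp only [pvMeas]
          omega
      · rw [pvA_loop, if_neg ht]
        have htv : target ≤ value := hinv _ (List.mem_cons_self ..)
        rw [pvA_inner_spec value target part htv _ current rest (by omega)]
        set children := ((pvB_primes value).filter
            (fun p => decide (current ≤ p ∧ p ≤ target))).reverse.map
            (fun p => (p, target - p, part ++ [p])) with hch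
        have hmeas : pvMeas (children ++ rest) < f := by
          have := pvA_inner_meas value target part ((value + 1 - current).toNat + 1) current rest
          rw [pvA_inner_spec value target part htv _ current rest (by omega), ← hch] at this
          have hhd : pvMeasItem (current, target, part) = 3 ^ target.toNat := rfl
          simp only [pvMeas, List.map_cons, List.sum_cons, hhd] at hm
          simp only [pvMeas] at this ⊢
          omega
        have hinv' : ∀ nd ∈ children ++ rest, nd.2.1 ≤ value := by
          intro nd hnd
          rw [List.mem_append] at hnd
          rcases hnd with h | h
          · rw [hch] at h
            rw [List.mem_map] at h
            obtain ⟨p, hp, hnd⟩ := h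
            rw [List.mem_reverse, List.mem_filter] at hp
            have := (mem_pvB_primes value p).mp hp.1
            have h2p := pv_is_prime_two_le p this.1
            rw [← hnd]
            simp only
            omega
          · exact hinv nd (List.mem_cons_of_mem _ h)
        rw [ih (children ++ rest) result hmeas hinv']
        simp only [List.flatMap_append, List.flatMap_cons]
        obtain ⟨g, hg⟩ : ∃ g, target.toNat + 1 = g + 1 := ⟨target.toNat, rfl⟩
        rw [hg, pvB_go_ne (pvB_primes value) g current target part ht]
        rw [hch, List.flatMap_map]
        have hcong : ∀ p ∈ ((pvB_primes value).filter
            (fun p => decide (current ≤ p ∧ p ≤ target))).reverse,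
            pvB_go (pvB_primes value) g p (target - p) (part ++ [p]) =
            pvB_go (pvB_primes value) ((target - p).toNat + 1) p (target - p) (part ++ [p]) := by
          intro p hp
          rw [List.mem_reverse, List.mem_filter] at hp
          obtain ⟨hmem, hcond⟩ := hp
          simp only [decide_eq_true_eq] at hcond
          have h2p := pv_is_prime_two_le p ((mem_pvB_primes value p).mp hmem).1
          have hpr : ∀ q ∈ pvB_primes value, 2 ≤ q := by
            intro q hq
            exact pv_is_prime_two_le q ((mem_pvB_primes value q).mp hq).1
          exact pvB_go_fuel ((target - p).toNat) (pvB_primes value) p (target - p) (part ++ [p])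
            g ((target - p).toNat + 1) hpr (le_refl _) (by omega) (by omega)
        rw [List.flatMap_congr hcong]

theorem pv_main (value : Int) :
    prime_decompositions_iterative value = prime_decompositions_iterative_alt value := by
  unfold prime_decompositions_iterative prime_decompositions_iterative_alt
  rw [pv_loop_eq value (3 ^ value.toNat + 1) [(0, value, [])] [] (by simp [pvMeas, pvMeasItem]) ?_]
  · simp
  · intro node hnd
    simp at hnd
    rw [hnd]

-- ===== VERDICT (by name: the statement is the Claim_ definition above) =====
theorem prime_decompositions_iterative_spec : Claim_equal_prime_decompositions_iterative := by
  intro value _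
  unfold Spec_prime_decompositions_iterative
  exact pv_main value
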